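-- pv_equiv track=rewrite | github.com/ArchiveTeam/wpull | wpull/protocol/ftp/ls/listing.py | parse_unix_perm
-- ===== SOURCE A (Python) =====
-- def parse_unix_perm(text):
--     '''Parse a Unix permission string and return integer value.'''
--     # Based on ftp-ls.c symperms
--     if len(text) != 9:
--         return 0
--
--     perms = 0
--
--     for triad_index in range(3):
--         string_index = triad_index * 3
--         perms <<= 3
--
--         if text[string_index] == 'r':
--             perms |= 1 << 2
--
--         if text[string_index + 1] == 'w':
--             perms |= 1 << 1
--
--         if text[string_index + 2] in 'xs':
--             perms |= 1
--
--     return perms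
-- ===== SOURCE B (Python) =====
-- def parse_unix_perm(text):
--     '''Parse a Unix permission string and return integer value.'''
--     if len(text) != 9:
--         return 0
--
--     perms = 0
--     for i, ch in enumerate(text):
--         if ((i % 3 != 2 and ch == 'rwxrwxrwx'[i])
--                 or (i % 3 == 2 and ch in 'xs')):
--             perms += 1 << (8 - i)
--     return perms
-- ===== Notes on version B (the rewrite author's own statement) =====
-- stated objective: alternative
-- what changed: Replaces the nested triad loop with shift-and-or accumulation by one flat enumerate pass adding a fixed positional weight 2**(8-i) for each set permission character.
import Mathlib
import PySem

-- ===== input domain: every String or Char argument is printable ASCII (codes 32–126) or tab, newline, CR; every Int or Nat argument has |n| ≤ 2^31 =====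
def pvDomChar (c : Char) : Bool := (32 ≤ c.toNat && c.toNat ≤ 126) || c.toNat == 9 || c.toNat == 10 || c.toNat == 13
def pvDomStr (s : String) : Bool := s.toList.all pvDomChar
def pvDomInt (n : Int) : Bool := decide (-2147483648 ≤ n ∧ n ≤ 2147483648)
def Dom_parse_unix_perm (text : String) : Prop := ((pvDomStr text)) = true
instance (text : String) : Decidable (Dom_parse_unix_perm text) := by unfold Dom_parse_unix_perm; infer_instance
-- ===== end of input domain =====

-- B replaces A's nested triad shift/or loop by one flat enumerate pass adding the
-- positional weight 2^(8-i) per set permission character (alternative decomposition).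

-- ===== PORT A =====
def parse_unix_perm (text : String) : Int :=
  if PySem.Str.len text ≠ 9 then 0
  else
    -- for triad_index in range(3):
    (PySem.List.pyRange 0 3 1).foldl (fun (perms : Int) (triad_index : Int) =>
      let string_index := triad_index * 3
      let perms := perms <<< 3
      -- if text[string_index] == 'r': perms |= 1 << 2
      let perms := if PySem.Str.pyGet? text string_index = some 'r'
                   then PySem.Int.bor perms ((1 : Int) <<< 2) else perms
      -- if text[string_index + 1] == 'w': perms |= 1 << 1
      let perms := if PySem.Str.pyGet? text (string_index + 1) = some 'w'
                   then PySem.Int.bor perms ((1 : Int) <<< 1) else perms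
      -- if text[string_index + 2] in 'xs': perms |= 1  (a one-char string is in 'xs' iff it is 'x' or 's')
      let perms := if PySem.Str.pyGet? text (string_index + 2) = some 'x'
                      ∨ PySem.Str.pyGet? text (string_index + 2) = some 's'
                   then PySem.Int.bor perms 1 else perms
      perms) 0

-- ===== PORT B =====
def parse_unix_perm_alt (text : String) : Int :=
  if PySem.Str.len text ≠ 9 then 0
  else
    -- for i, ch in enumerate(text): if set: perms += 1 << (8 - i)
    (PySem.List.enumerate text.toList 0).foldl (fun (perms : Int) p =>
      let i := p.1
      let ch := p.2
      -- (i % 3 != 2 and ch == 'rwxrwxrwx'[i]) or (i % 3 == 2 and ch in 'xs')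
      if (PySem.Int.mod i 3 ≠ 2 ∧ some ch = PySem.Str.pyGet? "rwxrwxrwx" i)
         ∨ (PySem.Int.mod i 3 = 2 ∧ (ch = 'x' ∨ ch = 's'))
      then perms + ((1 : Int) <<< (8 - i).toNat)   -- 0 ≤ i ≤ 8 here, so .toNat is exact
      else perms) 0

-- ===== PRECONDITION & SPEC =====
def Spec_parse_unix_perm (text : String) (out : Int) : Prop := out = parse_unix_perm_alt text
instance (text : String) (out : Int) : Decidable (Spec_parse_unix_perm text out) := by unfold Spec_parse_unix_perm; infer_instance

-- ===== CLAIM (what is proved, stated in full; the proofs are below) =====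
def Claim_equal_parse_unix_perm : Prop := ∀ (text : String), Dom_parse_unix_perm text → Spec_parse_unix_perm text (parse_unix_perm text)

-- ===== LEMMAS AND PROOFS =====

-- guarded or-update: 'if c: p |= x' is p ||| (x if c else 0)
lemma pvIteBor (c : Prop) [Decidable c] (p x : Int) :
    (if c then PySem.Int.bor p x else p) = PySem.Int.bor p (if c then x else 0) := by
  split_ifs <;> simp

-- guarded add-update: 'if c: p += w' is p + (w if c else 0)
lemma pvIteAdd (c : Prop) [Decidable c] (p w : Int) :
    (if c then p + w else p) = p + (if c then w else 0) := by
  split_ifs <;> simp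

set_option maxHeartbeats 4000000 in
lemma parse_unix_perm_eq_alt (text : String) :
    parse_unix_perm text = parse_unix_perm_alt text := by
  unfold parse_unix_perm parse_unix_perm_alt
  by_cases h : PySem.Str.len text = 9
  · rw [if_neg (not_not_intro h), if_neg (not_not_intro h)]
    simp only [pvIteBor, pvIteAdd]
    have hl9 : text.toList.length = 9 := by simp [PySem.Str.len_eq] at h; exact_mod_cast h
    rcases hl : text.toList with _|⟨c0,_|⟨c1,_|⟨c2,_|⟨c3,_|⟨c4,_|⟨c5,_|⟨c6,_|⟨c7,_|⟨c8,_|⟨c9,t⟩⟩⟩⟩⟩⟩⟩⟩⟩⟩ <;>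
      rw [hl] at hl9 <;> simp at hl9
    simp only [pysem, hl]
    rw [show PySem.List.pyRange 0 3 1 = [0,1,2] from by decide]
    have m2 : Int.fmod 2 3 = 2 := by decide
    have m5 : Int.fmod 5 3 = 2 := by decide
    have m8 : Int.fmod 8 3 = 2 := by decide
    have m1 : Int.fmod 1 3 ≠ 2 := by decide
    have m4 : Int.fmod 4 3 ≠ 2 := by decide
    have m6 : Int.fmod 6 3 ≠ 2 := by decide
    have m7 : Int.fmod 7 3 ≠ 2 := by decide
    have r0 : PySem.List.pyGet? "rwxrwxrwx".toList 0 = some 'r' := by decide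
    have r1 : PySem.List.pyGet? "rwxrwxrwx".toList 1 = some 'w' := by decide
    have r3 : PySem.List.pyGet? "rwxrwxrwx".toList 3 = some 'r' := by decide
    have r4 : PySem.List.pyGet? "rwxrwxrwx".toList 4 = some 'w' := by decide
    have r6 : PySem.List.pyGet? "rwxrwxrwx".toList 6 = some 'r' := by decide
    have r7 : PySem.List.pyGet? "rwxrwxrwx".toList 7 = some 'w' := by decide
    simp only [List.foldl]
    norm_num [List.map_cons, List.sum_cons, PySem.Int.mod, r0, r1, r3, r4, r6, r7]
    have ge2 : [c0,c1,c2,c3,c4,c5,c6,c7,c8][Int.toNat 2]'(by norm_num) = c2 := rfl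
    have ge3 : [c0,c1,c2,c3,c4,c5,c6,c7,c8][Int.toNat 3]'(by norm_num) = c3 := rfl
    have ge4 : [c0,c1,c2,c3,c4,c5,c6,c7,c8][Int.toNat 4]'(by norm_num) = c4 := rfl
    have ge5 : [c0,c1,c2,c3,c4,c5,c6,c7,c8][Int.toNat 5]'(by norm_num) = c5 := rfl
    have ge6 : [c0,c1,c2,c3,c4,c5,c6,c7,c8][Int.toNat 6]'(by norm_num) = c6 := rfl
    have ge7 : [c0,c1,c2,c3,c4,c5,c6,c7,c8][Int.toNat 7]'(by norm_num) = c7 := rfl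
    have ge8 : [c0,c1,c2,c3,c4,c5,c6,c7,c8][Int.toNat 8]'(by norm_num) = c8 := rfl
    simp only [ge2, ge3, ge4, ge5, ge6, ge7, ge8, m1, m2, m4, m5, m6, m7, m8,
      not_true, not_false_iff, true_and, false_and, false_or, or_false]
    simp only [← Bool.cond_decide]
    generalize decide (c0 = 'r') = b0
    generalize decide (c1 = 'w') = b1
    generalize decide (c2 = 'x' ∨ c2 = 's') = b2
    generalize decide (c3 = 'r') = b3
    generalize decide (c4 = 'w') = b4
    generalize decide (c5 = 'x' ∨ c5 = 's') = b5
    generalize decide (c6 = 'r') = b6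
    generalize decide (c7 = 'w') = b7
    generalize decide (c8 = 'x' ∨ c8 = 's') = b8
    revert b0 b1 b2 b3 b4 b5 b6 b7 b8
    decide
  · rw [if_pos h, if_pos h]

-- ===== VERDICT (by name: the statement is the Claim_ definition above) =====
theorem parse_unix_perm_spec : Claim_equal_parse_unix_perm := by
  intro text _
  unfold Spec_parse_unix_perm
  exact parse_unix_perm_eq_alt text
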